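-- pv_equiv track=rewrite | github.com/Sneha161106/SmartNexus | threat/threat_score.py | calculate_threat
-- ===== SOURCE A (Python) =====
-- def calculate_threat(objects):
--
--     score = 0
--
--     for obj in objects:
--
--         label = obj[0]
--
--         if label == "person":
--             score += 5
--
--         elif label == "knife":
--             score += 70
--
--         elif label == "scissors":
--             score += 60
--
--         elif label == "baseball bat":
--             score += 50
--
--     return score
-- ===== SOURCE B (Python) =====
-- WEIGHTS = {"person": 5, "knife": 70, "scissors": 60, "baseball bat": 50}
--
-- def calculate_threat(objects):
--     counts = {}
--     for obj in objects:
--         label = obj[0]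
--         counts[label] = counts.get(label, 0) + 1
--     return sum(counts.get(label, 0) * w for label, w in WEIGHTS.items())
-- ===== Notes on version B (the rewrite author's own statement) =====
-- stated objective: alternative
-- what changed: Replaced the per-object if/elif accumulation with an aggregate-then-combine shape: one pass builds a label frequency table, then the result is a weighted sum over a fixed 4-entry weight table.
import Mathlib
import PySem

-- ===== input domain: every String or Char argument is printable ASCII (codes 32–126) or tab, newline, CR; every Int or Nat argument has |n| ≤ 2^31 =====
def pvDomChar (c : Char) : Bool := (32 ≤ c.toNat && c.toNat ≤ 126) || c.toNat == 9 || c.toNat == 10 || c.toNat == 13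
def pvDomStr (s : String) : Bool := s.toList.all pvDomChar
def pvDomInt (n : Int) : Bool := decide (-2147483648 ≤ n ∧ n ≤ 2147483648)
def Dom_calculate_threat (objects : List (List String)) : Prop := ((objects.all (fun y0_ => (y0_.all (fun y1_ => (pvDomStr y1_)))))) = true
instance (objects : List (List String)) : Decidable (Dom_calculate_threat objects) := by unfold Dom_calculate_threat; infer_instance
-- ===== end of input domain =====

-- B builds a label frequency table in one pass and then combines it with a fixed
-- 4-entry weight table, instead of A's per-object if/elif accumulation.

-- ===== PORT A =====
def calculate_threat (objects : List (List String)) : Int :=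
  objects.foldl (fun score obj =>
    match PySem.List.pyGet? obj 0 with
    | none => score  -- Python raises IndexError here; excluded by Pre_
    | some label =>
      if label = "person" then score + 5
      else if label = "knife" then score + 70
      else if label = "scissors" then score + 60
      else if label = "baseball bat" then score + 50
      else score) 0

-- ===== PORT B =====
def pvWEIGHTS : List (String × Int) :=
  [("person", 5), ("knife", 70), ("scissors", 60), ("baseball bat", 50)]

def calculate_threat_alt (objects : List (List String)) : Int :=
  let counts := objects.foldl (fun d obj =>
    match PySem.List.pyGet? obj 0 with
    | none => d  -- Python raises IndexError here; excluded by Pre_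
    | some label => d.insert label (d.getD label 0 + 1)) (PySem.Dict.empty : PySem.Dict String Int)
  pvWEIGHTS.foldl (fun acc lw => acc + counts.getD lw.1 0 * lw.2) 0

-- ===== PRECONDITION & SPEC =====
-- Pre_ excludes inputs containing an empty inner list, on which A (obj[0]) raises IndexError.
def Pre_calculate_threat (objects : List (List String)) : Prop :=
  ∀ obj ∈ objects, obj ≠ []
instance (objects : List (List String)) : Decidable (Pre_calculate_threat objects) := by
  unfold Pre_calculate_threat; infer_instance

def pvWitness_calculate_threat : List (List String) :=
  [["person", "x"], ["knife"], ["cat"], ["baseball bat"]]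

def Spec_calculate_threat (objects : List (List String)) (out : Int) : Prop := out = calculate_threat_alt objects
instance (objects : List (List String)) (out : Int) : Decidable (Spec_calculate_threat objects out) := by unfold Spec_calculate_threat; infer_instance

-- ===== CLAIM (what is proved, stated in full; the proofs are below) =====
def Claim_equal_calculate_threat : Prop := ∀ (objects : List (List String)), Dom_calculate_threat objects → Pre_calculate_threat objects → Spec_calculate_threat objects (calculate_threat objects)

-- ===== LEMMAS AND PROOFS =====

-- per-label weight used to summarise A's branch chain
def pvWA (label : String) : Int :=
  if label = "person" then 5
  else if label = "knife" then 70
  else if label = "scissors" then 60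
  else if label = "baseball bat" then 50
  else 0

lemma pyGet?_head (obj : List String) (h : obj ≠ []) :
    PySem.List.pyGet? obj 0 = some obj.headI := by
  cases obj with
  | nil => exact absurd rfl h
  | cons a l => simp [PySem.List.pyGet?, PySem.List.pyIdx?, List.headI]

lemma sum_pvWA (ls : List String) :
    (ls.map pvWA).sum =
      5 * (ls.count "person" : Int) + 70 * (ls.count "knife" : Int)
        + 60 * (ls.count "scissors" : Int) + 50 * (ls.count "baseball bat" : Int) := by
  induction ls with
  | nil => simp
  | cons a l ih =>
    simp only [List.map_cons, List.sum_cons, ih, List.count_cons, beq_iff_eq, pvWA]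
    split_ifs <;> simp_all <;> push_cast <;> omega

lemma A_eq (objects : List (List String)) (h : Pre_calculate_threat objects) :
    calculate_threat objects = ((objects.map (·.headI)).map pvWA).sum := by
  unfold calculate_threat
  rw [PySem.List.foldl_congr_mem objects _ (fun score obj => score + pvWA obj.headI) 0
      (by intro acc obj hm; rw [pyGet?_head obj (h obj hm)]; simp only [pvWA]; split_ifs <;> simp)]
  rw [PySem.List.foldl_add]
  simp [List.map_map, Function.comp_def]

lemma B_eq (objects : List (List String)) (h : Pre_calculate_threat objects) :
    calculate_threat_alt objects =
      5 * ((objects.map (·.headI)).count "person" : Int)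
        + 70 * ((objects.map (·.headI)).count "knife" : Int)
        + 60 * ((objects.map (·.headI)).count "scissors" : Int)
        + 50 * ((objects.map (·.headI)).count "baseball bat" : Int) := by
  simp only [calculate_threat_alt]
  rw [PySem.List.foldl_congr_mem objects _
      (fun (d : PySem.Dict String Int) obj => d.insert obj.headI (d.getD obj.headI 0 + 1))
      PySem.Dict.empty
      (by intro acc obj hm; rw [pyGet?_head obj (h obj hm)])]
  rw [← List.foldl_map (f := fun obj : List String => obj.headI)
      (g := fun (d : PySem.Dict String Int) x => d.insert x (d.getD x 0 + 1))]
  simp only [pvWEIGHTS, List.foldl_cons, List.foldl_nil,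
    PySem.Dict.getD_foldl_insert_add_one, PySem.Dict.getD_empty]
  ring

-- ===== VERDICT (by name: the statement is the Claim_ definition above) =====
theorem calculate_threat_spec : Claim_equal_calculate_threat := by
  intro objects _ hpre
  unfold Spec_calculate_threat
  rw [A_eq objects hpre, B_eq objects hpre, sum_pvWA]
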